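-- pv_equiv track=rewrite | github.com/drussell23/JARVIS-AI | backend/vision/intelligence/enhanced_workflow_engine.py | _apply_efficiency_heuristics
-- ===== SOURCE A (Python) =====
-- from typing import Dict, List, Optional, Tuple, Any, Set
-- from collections import defaultdict
--
-- def _apply_efficiency_heuristics(sequence: List[str],
--                                context: Dict[str, Any]) -> List[str]:
--     """Apply heuristics to improve efficiency"""
--     # Group similar actions together
--     action_groups = defaultdict(list)
--     for action in sequence:
--         base_action = action.split('_')[0] if '_' in action else action
--         action_groups[base_action].append(action)
--
--     # Reconstruct sequence with grouped actions
--     optimized = []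
--     for group in action_groups.values():
--         optimized.extend(sorted(group))  # Keep related actions together
--
--     return optimized
-- ===== SOURCE B (Python) =====
-- from typing import Dict, List, Any
--
-- def _apply_efficiency_heuristics(sequence: List[str],
--                                context: Dict[str, Any]) -> List[str]:
--     """Apply heuristics to improve efficiency.
--
--     Same result as the grouping version, by a single composite-key sort:
--     record the position of the first appearance of each base prefix, then
--     sort the whole sequence by (first appearance of base, action).
--     """
--     first_index = {}
--     for i, action in enumerate(sequence):
--         first_index.setdefault(action.split('_')[0], i)
--     return sorted(sequence, key=lambda a: (first_index[a.split('_')[0]], a))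
-- ===== Notes on version B (the rewrite author's own statement) =====
-- stated objective: alternative
-- what changed: Replaces the defaultdict grouping with per-group sorts and concatenation by a one-pass first-appearance index table followed by a single global sort on the composite key (first index of base prefix, action).
import Mathlib
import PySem

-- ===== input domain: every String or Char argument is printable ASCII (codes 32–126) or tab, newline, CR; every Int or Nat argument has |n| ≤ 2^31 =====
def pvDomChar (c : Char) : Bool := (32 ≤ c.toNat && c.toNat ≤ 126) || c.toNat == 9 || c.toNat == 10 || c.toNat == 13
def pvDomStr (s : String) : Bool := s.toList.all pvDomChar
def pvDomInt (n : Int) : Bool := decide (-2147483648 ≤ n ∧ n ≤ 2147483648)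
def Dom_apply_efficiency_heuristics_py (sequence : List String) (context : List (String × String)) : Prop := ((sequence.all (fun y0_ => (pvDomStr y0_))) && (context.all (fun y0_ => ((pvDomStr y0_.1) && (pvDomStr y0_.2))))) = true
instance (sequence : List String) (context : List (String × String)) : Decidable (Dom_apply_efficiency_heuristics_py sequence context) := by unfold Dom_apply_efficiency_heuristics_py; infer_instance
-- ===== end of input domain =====

-- B replaces A's defaultdict grouping + per-group sorts by a first-appearance index table and one
-- composite-key sort (objective: alternative decomposition, same cost).

-- ===== PORT A =====
-- base_action = action.split('_')[0] if '_' in action else action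
-- ('.getD ""' after pyGet? 0 is exact: split of a string never returns an empty list, so [0] cannot raise;
--  '.getD []' after split? is exact: the separator is the literal "_" ≠ "")
def pvBaseA (action : String) : String :=
  if PySem.Str.isIn "_" action = true then
    (PySem.List.pyGet? ((PySem.Str.split? action "_").getD []) 0).getD ""
  else action

def apply_efficiency_heuristics_py (sequence : List String) (context : List (String × String)) : List String :=
  -- action_groups = defaultdict(list); action_groups[base_action].append(action)
  let action_groups : PySem.Dict String (List String) :=
    sequence.foldl (fun d action => d.modify (pvBaseA action) [] (fun g => g ++ [action])) PySem.Dict.empty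
  -- for group in action_groups.values(): optimized.extend(sorted(group))
  action_groups.values.foldl (fun optimized group => optimized ++ PySem.List.sorted group (fun x => x) false) []

-- ===== PORT B =====
-- a.split('_')[0]  (same exactness notes as for pvBaseA)
def pvBaseB (a : String) : String :=
  (PySem.List.pyGet? ((PySem.Str.split? a "_").getD []) 0).getD ""

def apply_efficiency_heuristics_py_alt (sequence : List String) (context : List (String × String)) : List String :=
  -- first_index.setdefault(action.split('_')[0], i) over enumerate(sequence)
  let first_index : PySem.Dict String Int :=
    (PySem.List.enumerate sequence).foldl (fun d p => d.setdefault (pvBaseB p.2) p.1) PySem.Dict.empty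
  -- sorted(sequence, key=lambda a: (first_index[a.split('_')[0]], a))
  -- ('.getD … 0' is exact: every base prefix of the sequence is a key of first_index, so the lookup cannot raise)
  PySem.List.sorted2 sequence (fun a => first_index.getD (pvBaseB a) 0) (fun a => a) false

-- ===== PRECONDITION & SPEC =====
def Spec_apply_efficiency_heuristics_py (sequence : List String) (context : List (String × String)) (out : List String) : Prop := out = apply_efficiency_heuristics_py_alt sequence context
instance (sequence : List String) (context : List (String × String)) (out : List String) : Decidable (Spec_apply_efficiency_heuristics_py sequence context out) := by unfold Spec_apply_efficiency_heuristics_py; infer_instance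

-- ===== CLAIM (what is proved, stated in full; the proofs are below) =====
def Claim_equal_apply_efficiency_heuristics_py : Prop := ∀ (sequence : List String) (context : List (String × String)), Dom_apply_efficiency_heuristics_py sequence context → Spec_apply_efficiency_heuristics_py sequence context (apply_efficiency_heuristics_py sequence context)

-- ===== LEMMAS AND PROOFS =====

-- A's conditional base equals B's unconditional split[0]: when '_' does not occur, split returns [action].
lemma pv_splitOn_go_of_no_occ (sep : List Char) (fuel : Nat) (l cur : List Char)
    (acc : List (List Char)) (h : ∀ t, t <:+ l → ¬ sep <+: t) :
    PySem.Chars.splitOn.go sep fuel l cur acc = ((cur.reverse ++ l) :: acc).reverse := by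
  induction fuel generalizing l cur acc with
  | zero => rw [PySem.Chars.splitOn.go.eq_def]
  | succ fuel ih =>
    rw [PySem.Chars.splitOn.go.eq_def]
    match l with
    | [] => simp
    | c :: rest =>
      have hpre : sep.isPrefixOf (c :: rest) = false := by
        by_contra hx
        exact h (c :: rest) (List.suffix_refl _) (List.isPrefixOf_iff_prefix.mp (by simpa using hx))
      simp only [hpre]
      rw [ih rest (c :: cur) acc (fun t ht => h t (ht.trans (List.suffix_cons c rest)))]
      simp

lemma pv_base_eq (a : String) : pvBaseA a = pvBaseB a := by
  by_cases h : PySem.Str.isIn "_" a = true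
  · unfold pvBaseA pvBaseB
    rw [if_pos h]
  · have h' : PySem.Str.isIn "_" a = false := by simpa using h
    have hno : ¬ (['_'] <:+: a.toList) := by
      rw [← PySem.Chars.isIn_eq_false_iff]
      simpa [PySem.Str.isIn] using h'
    have hsplit : PySem.Chars.splitOn a.toList ['_'] = [a.toList] := by
      unfold PySem.Chars.splitOn
      rw [pv_splitOn_go_of_no_occ _ _ _ _ _ (fun t ht hp => hno (hp.isInfix.trans ht.isInfix))]
      simp
    have hl : "_".toList = ['_'] := rfl
    simp [pvBaseA, pvBaseB, PySem.Str.split?, PySem.Chars.split?, hl, hsplit,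
      PySem.List.pyGet?, PySem.List.pyIdx?]

-- keys of Dict.insert / contains over keys
lemma pv_keys_insert {ν : Type} (d : PySem.Dict String ν) (k : String) (v : ν) :
    (d.insert k v).keys = if d.contains k then d.keys else d.keys ++ [k] := by
  by_cases h : d.contains k = true
  · simp only [PySem.Dict.insert, h, if_true, PySem.Dict.keys, List.map_map]
    refine List.map_congr_left (fun p _ => ?_)
    by_cases hp : (p.1 == k) = true
    · simp [Function.comp, (eq_of_beq hp).symm]
    · simp [Function.comp, hp]
  · simp [PySem.Dict.insert, h, PySem.Dict.keys]

lemma pv_contains_keys {ν : Type} (d : PySem.Dict String ν) (k : String) :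
    d.contains k = d.keys.contains k := by
  rcases d with ⟨items⟩
  induction items with
  | nil => rfl
  | cons p t ih =>
    simp only [PySem.Dict.contains, PySem.Dict.keys, List.map_cons, List.any_cons,
      List.contains_cons] at *
    rw [ih]
    conv_lhs => rw [BEq.comm]

-- ===== the grouping fold of A =====

lemma pv_grp_keys (l : List String) (d : PySem.Dict String (List String)) :
    (l.foldl (fun d a => d.modify (pvBaseB a) [] (fun g => g ++ [a])) d).keys
      = (l.map pvBaseB).foldl PySem.Set.add d.keys := by
  induction l generalizing d with
  | nil => rfl
  | cons a l ih =>
    rw [List.map_cons, List.foldl_cons, List.foldl_cons, ih]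
    congr 1
    rw [PySem.Dict.modify, pv_keys_insert, pv_contains_keys]
    simp [PySem.Set.add, PySem.Set.contains]

lemma pv_grp_getD (l : List String) (d : PySem.Dict String (List String)) (b : String) :
    (l.foldl (fun d a => d.modify (pvBaseB a) [] (fun g => g ++ [a])) d).getD b []
      = d.getD b [] ++ l.filter (fun a => pvBaseB a == b) := by
  induction l generalizing d with
  | nil => simp
  | cons a l ih =>
    rw [List.foldl_cons, ih, PySem.Dict.modify]
    by_cases hb : pvBaseB a = b
    · subst hb
      rw [PySem.Dict.getD_insert_self]
      simp
    · rw [PySem.Dict.getD_insert_of_ne _ _ _ (Ne.symm hb)]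
      have : (pvBaseB a == b) = false := by simpa using hb
      simp [this]

-- A in normal form: first-occurrence-ordered bases, each block the sorted fiber
lemma pv_A_nf (l : List String) (c : List (String × String)) :
    apply_efficiency_heuristics_py l c
      = (PySem.Set.ofList (l.map pvBaseB)).flatMap
          (fun b => PySem.List.sorted (l.filter (fun a => pvBaseB a == b)) (fun x => x) false) := by
  simp only [apply_efficiency_heuristics_py, pv_base_eq]
  have hkeys : (l.foldl (fun d a => d.modify (pvBaseB a) [] (fun g => g ++ [a]))
      (PySem.Dict.empty : PySem.Dict String (List String))).keys
      = PySem.Set.ofList (l.map pvBaseB) := by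
    rw [pv_grp_keys, PySem.Set.ofList_eq_foldl]
    rfl
  have hnd : (l.foldl (fun d a => d.modify (pvBaseB a) [] (fun g => g ++ [a]))
      (PySem.Dict.empty : PySem.Dict String (List String))).keys.Nodup := by
    rw [hkeys]; exact PySem.Set.nodup_ofList _
  rw [PySem.Dict.values_eq_map_keys _ hnd [], PySem.List.foldl_append_eq_flatMap,
    List.flatMap_map, hkeys]
  refine (List.nil_append _).trans (List.flatMap_congr ?_)
  intro b _
  rw [pv_grp_getD]
  rfl

-- ===== the first-index fold of B =====

def pvFi (l : List String) : PySem.Dict String Int :=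
  (PySem.List.enumerate l).foldl (fun d p => d.setdefault (pvBaseB p.2) p.1) PySem.Dict.empty

lemma pv_fi_keys (l : List String) (n : Int) (d : PySem.Dict String Int) :
    ((PySem.List.enumerate l n).foldl (fun d p => d.setdefault (pvBaseB p.2) p.1) d).keys
      = (l.map pvBaseB).foldl PySem.Set.add d.keys := by
  induction l generalizing n d with
  | nil => rfl
  | cons a l ih =>
    rw [show PySem.List.enumerate (a :: l) n = (n, a) :: PySem.List.enumerate l (n+1) from rfl,
      List.foldl_cons, ih, List.map_cons, List.foldl_cons]
    congr 1
    by_cases hc : d.contains (pvBaseB a) = true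
    · rw [PySem.Dict.setdefault_of_contains _ _ hc]
      rw [pv_contains_keys] at hc
      simp only [PySem.Set.add, PySem.Set.contains, hc, if_true]
    · have hc' : d.contains (pvBaseB a) = false := by simpa using hc
      rw [PySem.Dict.setdefault_of_not_contains _ _ hc', pv_keys_insert, hc']
      rw [pv_contains_keys] at hc'
      simp only [PySem.Set.add, PySem.Set.contains, hc', if_false, Bool.false_eq_true]

lemma pv_fi_pairwise (l : List String) (n : Int) (d : PySem.Dict String Int)
    (hb : ∀ k ∈ d.keys, d.getD k 0 < n)
    (hp : d.keys.Pairwise (fun b b' => d.getD b 0 < d.getD b' 0)) :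
    (((PySem.List.enumerate l n).foldl (fun d p => d.setdefault (pvBaseB p.2) p.1) d).keys).Pairwise
      (fun b b' => ((PySem.List.enumerate l n).foldl (fun d p => d.setdefault (pvBaseB p.2) p.1) d).getD b 0
        < ((PySem.List.enumerate l n).foldl (fun d p => d.setdefault (pvBaseB p.2) p.1) d).getD b' 0) := by
  induction l generalizing n d with
  | nil => exact hp
  | cons a l ih =>
    rw [show PySem.List.enumerate (a :: l) n = (n, a) :: PySem.List.enumerate l (n+1) from rfl,
      List.foldl_cons]
    by_cases hc : d.contains (pvBaseB a) = true
    · rw [PySem.Dict.setdefault_of_contains _ _ hc]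
      exact ih (n+1) d (fun k hk => lt_trans (hb k hk) (by omega)) hp
    · have hc' : d.contains (pvBaseB a) = false := by simpa using hc
      have hnm : pvBaseB a ∉ d.keys := fun hm =>
        hc ((PySem.Dict.contains_iff_mem_keys d _).mpr hm)
      rw [PySem.Dict.setdefault_of_not_contains _ _ hc']
      refine ih (n+1) _ ?_ ?_
      · intro k hk
        rw [pv_keys_insert, hc'] at hk
        simp only [Bool.false_eq_true, if_false] at hk
        rcases List.mem_append.mp hk with hk | hk
        · have hkne : k ≠ pvBaseB a := fun he => hnm (he ▸ hk)
          rw [PySem.Dict.getD_insert_of_ne d _ _ hkne]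
          exact lt_trans (hb k hk) (by omega)
        · have : k = pvBaseB a := by simpa using hk
          subst this
          rw [PySem.Dict.getD_insert_self]
          omega
      · rw [pv_keys_insert, hc']
        simp only [Bool.false_eq_true, if_false]
        rw [List.pairwise_append]
        refine ⟨?_, List.pairwise_singleton _ _, ?_⟩
        · refine hp.imp_of_mem (fun {x y} hx hy hxy => ?_)
          have hxne : x ≠ pvBaseB a := fun he => hnm (he ▸ hx)
          have hyne : y ≠ pvBaseB a := fun he => hnm (he ▸ hy)
          rw [PySem.Dict.getD_insert_of_ne d _ _ hxne, PySem.Dict.getD_insert_of_ne d _ _ hyne]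
          exact hxy
        · intro x hx y hy
          have hy' : y = pvBaseB a := by simpa using hy
          subst hy'
          have hxne : x ≠ pvBaseB a := fun he => hnm (he ▸ hx)
          rw [PySem.Dict.getD_insert_of_ne d _ _ hxne, PySem.Dict.getD_insert_self]
          exact hb x hx

-- the composite key of B, as a lexicographic pair
def pvKey (l : List String) (a : String) : Int ×ₗ String := toLex ((pvFi l).getD (pvBaseB a) 0, a)

lemma pv_sorted2_eq_sorted_lex (xs : List String) (k1 : String → Int) :
    PySem.List.sorted2 xs k1 (fun a => a) false
      = PySem.List.sorted xs (fun a => toLex ((k1 a, a) : Int × String)) false := by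
  rw [PySem.List.sorted_eq_foldl_insertBy]
  simp only [PySem.List.sorted2]
  congr 1
  funext acc x
  congr 1
  funext p q
  by_cases h1 : k1 p < k1 q <;> by_cases h2 : k1 q < k1 p <;> by_cases h3 : p < q <;>
    simp [h1, h2, h3, Prod.Lex.toLex_lt_toLex] <;> omega

lemma pv_B_nf (l : List String) (c : List (String × String)) :
    apply_efficiency_heuristics_py_alt l c = PySem.List.sorted l (pvKey l) false := by
  simp only [apply_efficiency_heuristics_py_alt]
  exact pv_sorted2_eq_sorted_lex l _

-- ===== permutation and order facts =====

lemma pv_count_flatMap (bs l : List String) (x : String) (hnd : bs.Nodup) :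
    List.count x (bs.flatMap (fun b => l.filter (fun a => pvBaseB a == b)))
      = if pvBaseB x ∈ bs then List.count x l else 0 := by
  induction bs with
  | nil => simp
  | cons b bs ih =>
    rw [List.flatMap_cons, List.count_append, ih hnd.of_cons]
    by_cases hx : pvBaseB x = b
    · have h1 : List.count x (l.filter (fun a => pvBaseB a == b)) = List.count x l :=
        List.count_filter (by simpa using hx)
      have h2 : b ∉ bs := hx ▸ (hx ▸ (List.nodup_cons.mp hnd).1)
      simp [h1, hx, h2]
    · have h1 : List.count x (l.filter (fun a => pvBaseB a == b)) = 0 := by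
        rw [List.count_eq_zero]
        intro hm
        exact hx (by simpa using (List.mem_filter.mp hm).2)
      simp [h1, hx]

lemma pv_C_perm (l : List String) :
    ((PySem.Set.ofList (l.map pvBaseB)).flatMap
      (fun b => PySem.List.sorted (l.filter (fun a => pvBaseB a == b)) (fun x => x) false)).Perm l := by
  refine (List.Perm.flatMap_left _ (fun b _ => PySem.List.sorted_perm _ _ _)).trans ?_
  rw [List.perm_iff_count]
  intro x
  rw [pv_count_flatMap _ _ _ (PySem.Set.nodup_ofList _)]
  by_cases hx : x ∈ l
  · have : pvBaseB x ∈ PySem.Set.ofList (l.map pvBaseB) :=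
      (PySem.Set.mem_ofList _ _).mpr (List.mem_map_of_mem hx)
    simp [this]
  · have hc : List.count x l = 0 := List.count_eq_zero.mpr hx
    simp [hc]

lemma pv_C_pairwise (l : List String) :
    ((PySem.Set.ofList (l.map pvBaseB)).flatMap
      (fun b => PySem.List.sorted (l.filter (fun a => pvBaseB a == b)) (fun x => x) false)).Pairwise
      (fun x y => pvKey l x ≤ pvKey l y) := by
  have hbs : (pvFi l).keys = PySem.Set.ofList (l.map pvBaseB) := by
    rw [pvFi, pv_fi_keys, PySem.Set.ofList_eq_foldl]
    rfl
  have hpair : (PySem.Set.ofList (l.map pvBaseB)).Pairwise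
      (fun b b' => (pvFi l).getD b 0 < (pvFi l).getD b' 0) := by
    rw [← hbs]
    exact pv_fi_pairwise l 0 PySem.Dict.empty (by intro k hk; cases hk) List.Pairwise.nil
  rw [List.flatMap_def, List.pairwise_flatten]
  constructor
  · intro blk hblk
    rcases List.mem_map.mp hblk with ⟨b, _, rfl⟩
    refine (PySem.List.sorted_pairwise _ _).imp_of_mem (fun {x y} hx hy hxy => ?_)
    have hfx : pvBaseB x = b := by
      simpa using (List.mem_filter.mp ((PySem.List.mem_sorted _ _ _ _).mp hx)).2
    have hfy : pvBaseB y = b := by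
      simpa using (List.mem_filter.mp ((PySem.List.mem_sorted _ _ _ _).mp hy)).2
    exact Prod.Lex.toLex_le_toLex.mpr (Or.inr ⟨by rw [hfx, hfy], hxy⟩)
  · rw [List.pairwise_map]
    refine hpair.imp_of_mem (fun {b b'} _ _ hlt => ?_)
    intro x hx y hy
    have hfx : pvBaseB x = b := by
      simpa using (List.mem_filter.mp ((PySem.List.mem_sorted _ _ _ _).mp hx)).2
    have hfy : pvBaseB y = b' := by
      simpa using (List.mem_filter.mp ((PySem.List.mem_sorted _ _ _ _).mp hy)).2
    exact Prod.Lex.toLex_le_toLex.mpr (Or.inl (by rw [hfx, hfy]; exact hlt))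

lemma pv_key_inj (l : List String) : Function.Injective (pvKey l) := by
  intro a b h
  have := congrArg (fun x : Int ×ₗ String => (ofLex x).2) h
  simpa [pvKey] using this

-- ===== VERDICT (by name: the statement is the Claim_ definition above) =====
theorem apply_efficiency_heuristics_py_spec : Claim_equal_apply_efficiency_heuristics_py := by
  intro l c _
  unfold Spec_apply_efficiency_heuristics_py
  rw [pv_A_nf, pv_B_nf]
  exact PySem.List.eq_of_perm_of_pairwise_le_of_injective (pvKey l) (pv_key_inj l)
    ((pv_C_perm l).trans (PySem.List.sorted_perm l (pvKey l) false).symm)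
    (pv_C_pairwise l)
    (PySem.List.sorted_pairwise l (pvKey l))
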